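-- pv_equiv track=rewrite | github.com/conanWinner/Schedule_Project | service/constraints_service.py | non_conflict_periods
-- ===== SOURCE A (Python) =====
-- def non_conflict_periods(selected_classes):
--     # Không trùng tiết học
--     conflicts = 0
--     time_slots = set()
--     for _, (teacher, day, periods, area, room) in selected_classes:
--         for p in periods:
--             slot = (day, p)
--             if slot in time_slots:
--                 conflicts += 1
--             time_slots.add(slot)
--
--     return conflicts
-- ===== SOURCE B (Python) =====
-- def non_conflict_periods(selected_classes):
--     # Không trùng tiết học
--     slots = [(day, p)
--              for _, (teacher, day, periods, area, room) in selected_classes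
--              for p in periods]
--     counts = {}
--     for s in slots:
--         counts[s] = counts.get(s, 0) + 1
--     return sum(c - 1 for c in counts.values())
-- ===== Notes on version B (the rewrite author's own statement) =====
-- stated objective: alternative
-- what changed: B first flattens every class's (day, period) slots into one list, then builds a multiplicity dict (a hand-rolled Counter) in a separate pass and returns sum(c - 1) over its values, so A's running seen-set with its membership-test-and-increment branch is replaced by staged passes and the total-minus-distinct arithmetic on multiplicities.
import Mathlib
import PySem

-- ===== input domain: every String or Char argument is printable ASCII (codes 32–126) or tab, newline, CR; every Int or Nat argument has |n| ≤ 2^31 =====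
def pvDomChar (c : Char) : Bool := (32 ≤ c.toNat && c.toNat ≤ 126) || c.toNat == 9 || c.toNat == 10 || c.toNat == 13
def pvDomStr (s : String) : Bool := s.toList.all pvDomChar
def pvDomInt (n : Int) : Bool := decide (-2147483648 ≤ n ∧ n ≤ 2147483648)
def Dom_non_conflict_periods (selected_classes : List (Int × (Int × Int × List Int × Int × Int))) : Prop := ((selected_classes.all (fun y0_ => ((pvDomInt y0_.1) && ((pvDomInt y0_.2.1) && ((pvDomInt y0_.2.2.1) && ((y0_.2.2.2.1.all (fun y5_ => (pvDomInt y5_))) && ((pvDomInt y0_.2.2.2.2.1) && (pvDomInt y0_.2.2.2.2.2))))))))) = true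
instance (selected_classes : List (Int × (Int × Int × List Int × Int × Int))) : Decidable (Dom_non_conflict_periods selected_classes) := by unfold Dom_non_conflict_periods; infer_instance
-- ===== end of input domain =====

-- B replaces A's single-pass seen-set with staged passes: flatten all slots, build a
-- multiplicity dict, then sum (c - 1) over its values (alternative decomposition; same cost).

-- ===== PORT A =====
-- one step of A's inner loop body: check membership, bump conflicts, add the slot
def pvStepA (acc : Int × PySem.Set (Int × Int)) (slot : Int × Int) : Int × PySem.Set (Int × Int) :=
  (if PySem.Set.contains acc.2 slot then acc.1 + 1 else acc.1, PySem.Set.add acc.2 slot)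

def non_conflict_periods (selected_classes : List (Int × (Int × Int × List Int × Int × Int))) : Int :=
  (selected_classes.foldl
    (fun acc cls =>
      let day := cls.2.2.1
      let periods := cls.2.2.2.1
      periods.foldl (fun acc p => pvStepA acc (day, p)) acc)
    (0, PySem.Set.empty)).1

-- ===== PORT B =====
def non_conflict_periods_alt (selected_classes : List (Int × (Int × Int × List Int × Int × Int))) : Int :=
  let slots := selected_classes.flatMap (fun cls => cls.2.2.2.1.map (fun p => (cls.2.2.1, p)))
  let counts : PySem.Dict (Int × Int) Int :=
    slots.foldl (fun d s => d.insert s (d.getD s 0 + 1)) PySem.Dict.empty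
  (counts.values.map (fun c => c - 1)).sum

-- ===== PRECONDITION & SPEC =====
def Spec_non_conflict_periods (selected_classes : List (Int × (Int × Int × List Int × Int × Int))) (out : Int) : Prop := out = non_conflict_periods_alt selected_classes
instance (selected_classes : List (Int × (Int × Int × List Int × Int × Int))) (out : Int) : Decidable (Spec_non_conflict_periods selected_classes out) := by unfold Spec_non_conflict_periods; infer_instance

-- ===== CLAIM (what is proved, stated in full; the proofs are below) =====
def Claim_equal_non_conflict_periods : Prop := ∀ (selected_classes : List (Int × (Int × Int × List Int × Int × Int))), Dom_non_conflict_periods selected_classes → Spec_non_conflict_periods selected_classes (non_conflict_periods selected_classes)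

-- ===== LEMMAS AND PROOFS =====

-- Core invariant of A's loop, over any flat list of slots: starting from (c, s) with s deduplicated,
-- the loop ends in (c + |l| + |s| - |s.update(l)|, s.update(l)).
theorem pvFoldA_eq (l : List (Int × Int)) (c : Int) (s : PySem.Set (Int × Int)) (hs : s.Nodup) :
    l.foldl pvStepA (c, s)
      = (c + (l.length : Int) + (s.length : Int) - ((PySem.Set.update s l).length : Int),
         PySem.Set.update s l) := by
  induction l generalizing c s with
  | nil => simp [PySem.Set.update]
  | cons x xs ih =>
    rw [List.foldl_cons, PySem.Set.update_cons]
    by_cases hx : x ∈ s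
    · have hstep : pvStepA (c, s) x = (c + 1, s) := by
        simp [pvStepA, hx]
      rw [hstep, ih (c + 1) s hs, PySem.Set.add_of_mem hx]
      rw [Prod.mk.injEq]
      exact ⟨by simp only [List.length_cons]; push_cast; ring, rfl⟩
    · have hstep : pvStepA (c, s) x = (c, s ++ [x]) := by
        simp [pvStepA, hx]
      have hnd : (s ++ [x]).Nodup := by
        refine List.Nodup.append hs (List.nodup_singleton x) ?_
        intro a ha hb
        simp only [List.mem_singleton] at hb
        subst hb
        exact hx ha
      rw [hstep, ih c (s ++ [x]) hnd, PySem.Set.add_of_not_mem hx]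
      rw [Prod.mk.injEq]
      exact ⟨by simp only [List.length_cons, List.length_append, List.length_nil]; push_cast; ring, rfl⟩

-- A's nested loop equals the flat loop over the flattened slot list.
theorem pvNested_eq_flat (cls : List (Int × (Int × Int × List Int × Int × Int)))
    (acc : Int × PySem.Set (Int × Int)) :
    cls.foldl
      (fun acc cls =>
        let day := cls.2.2.1
        let periods := cls.2.2.2.1
        periods.foldl (fun acc p => pvStepA acc (day, p)) acc) acc
      = (cls.flatMap (fun c => c.2.2.2.1.map (fun p => (c.2.2.1, p)))).foldl pvStepA acc := by
  induction cls generalizing acc with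
  | nil => rfl
  | cons x xs ih =>
    simp only [List.foldl_cons, List.flatMap_cons, List.foldl_append]
    rw [ih]
    congr 1
    rw [List.foldl_map]

-- subtracting 1 per summand: Σ (count - 1) = Σ count - |d|, over the integers
theorem pvSumSubOne (d l : List (Int × Int)) :
    ((d.map (fun s => (l.count s : Int) - 1)).sum)
      = ((d.map (fun s => l.count s)).sum : Int) - (d.length : Int) := by
  induction d with
  | nil => simp
  | cons x xs ih =>
    simp only [List.map_cons, List.sum_cons, List.length_cons, ih]
    push_cast
    ring

-- the counts over the ordered distinct slots partition the slot list
theorem pvSumCountDedup (l : List (Int × Int)) :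
    ((PySem.List.dedup l).map (fun s => l.count s)).sum = l.length := by
  have hperm : (PySem.List.dedup l).Perm l.dedup := by
    rw [List.perm_ext_iff_of_nodup (PySem.List.nodup_dedup l) l.nodup_dedup]
    intro a
    rw [PySem.List.mem_dedup, List.mem_dedup]
  have hcount : ∀ s : Int × Int,
      l.count s = @List.count (Int × Int) instBEqOfDecidableEq s l := by
    intro s
    simp only [List.count_eq_countP]
    apply List.countP_congr
    intro a _
    by_cases h : a = s <;> simp [h]
  calc ((PySem.List.dedup l).map (fun s => l.count s)).sum
      = (l.dedup.map (fun s => l.count s)).sum := (hperm.map _).sum_eq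
    _ = (l.dedup.map (fun s => @List.count (Int × Int) instBEqOfDecidableEq s l)).sum := by
        simp only [hcount]
    _ = l.length := l.sum_map_count_dedup_eq_length

-- B's hand-rolled counting loop is Counter(slots); its values are the counts over the
-- ordered distinct slots, so B's sum is the sum over dedup of (count - 1).
theorem pvAltSum (l : List (Int × Int)) :
    (((l.foldl (fun d s => d.insert s (d.getD s 0 + 1)) PySem.Dict.empty).values).map
        (fun c => c - 1)).sum
      = ((PySem.List.dedup l).map (fun s => (l.count s : Int) - 1)).sum := by
  rw [PySem.Dict.foldl_insert_getD_add_one_eq_counter]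
  simp only [PySem.Dict.values, PySem.Dict.items_counter, List.map_map,
             PySem.List.dedup_eq_ofList]
  rfl

-- ===== VERDICT (by name: the statement is the Claim_ definition above) =====
theorem non_conflict_periods_spec : Claim_equal_non_conflict_periods := by
  intro sc _
  unfold Spec_non_conflict_periods non_conflict_periods non_conflict_periods_alt
  rw [pvNested_eq_flat]
  rw [show ((0 : Int), (PySem.Set.empty : PySem.Set (Int × Int))) = ((0 : Int), ([] : List (Int × Int))) from rfl]
  rw [pvFoldA_eq _ 0 [] List.nodup_nil]
  rw [pvAltSum, pvSumSubOne, pvSumCountDedup]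
  simp [PySem.List.dedup_eq_ofList, PySem.Set.update_nil_left]
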